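-- pv_equiv track=rewrite | github.com/dusterbloom/fastRTC | voice_assistant_with_memory_V2.py | should_store_memory
-- ===== SOURCE A (Python) =====
-- def should_store_memory(user_text: str, assistant_text: str) -> tuple[bool, str]:
--     user_lower = user_text.lower().strip()
--     if len(user_lower) == 0: return False, "empty_input"
--     if len(user_lower) <= 3 and not user_lower.startswith("my name is"): return False, "too_short"
--
--     common_transient = ['yes', 'no', 'ok', 'okay', 'thanks', 'thank you', 'um', 'uh', 'got it', 'good', 'fine', 'alright']
--     if user_lower in common_transient: return False, "acknowledgment"
--     if user_lower.startswith("and ") and len(user_lower.split()) < 4: return False, "minor_continuation"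
--
--     if any(p in user_lower for p in ['my name is', 'i am ', 'call me ']): return True, "personal_info"
--     if any(p in user_lower for p in ['i live in', 'i work at', 'i was born in']): return True, "personal_info"
--     if any(p in user_lower for p in ['i like', 'i love', 'i hate', 'my favorite', 'i prefer', 'i dislike']): return True, "preference"
--     if any(p in user_lower for p in ['remember this', 'don\'t forget', 'important to know', 'make a note']): return True, "important"
--     if any(p in user_lower for p in ['what do you remember', 'what do you know about me', 'tell me about yourself']): return False, "recall_request"
--     if len(user_text.split()) > 7: return True, "conversation_turn"
--     return False, "filtered_by_default"
-- ===== SOURCE B (Python) =====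
-- # B: one flat phrase->priority map scanned in a single unordered pass; the
-- # minimum matched priority picks the outcome from a lookup table (correct
-- # because a smaller priority always wins, exactly as A's ordered if-chain).
-- _PHRASES = {
--     'my name is': 0, 'i am ': 0, 'call me ': 0,
--     'i live in': 1, 'i work at': 1, 'i was born in': 1,
--     'i like': 2, 'i love': 2, 'i hate': 2, 'my favorite': 2, 'i prefer': 2, 'i dislike': 2,
--     'remember this': 3, "don't forget": 3, 'important to know': 3, 'make a note': 3,
--     'what do you remember': 4, 'what do you know about me': 4, 'tell me about yourself': 4,
-- }
-- _OUTCOMES = [(True, 'personal_info'), (True, 'personal_info'), (True, 'preference'),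
--              (True, 'important'), (False, 'recall_request')]
--
--
-- def _hits(u):
--     return [prio for phrase, prio in _PHRASES.items() if phrase in u]
--
--
-- def should_store_memory(user_text: str, assistant_text: str) -> tuple[bool, str]:
--     u = user_text.lower().strip()
--     if not u:
--         return False, "empty_input"
--     if len(u) <= 3 and not u.startswith("my name is"):
--         return False, "too_short"
--     if u in ('yes', 'no', 'ok', 'okay', 'thanks', 'thank you', 'um', 'uh',
--              'got it', 'good', 'fine', 'alright'):
--         return False, "acknowledgment"
--     if u.startswith("and ") and len(u.split()) < 4:
--         return False, "minor_continuation"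
--     hits = _hits(u)
--     if hits:
--         return _OUTCOMES[min(hits)]
--     if len(user_text.split()) > 7:
--         return True, "conversation_turn"
--     return False, "filtered_by_default"
-- ===== Notes on version B (the rewrite author's own statement) =====
-- stated objective: alternative
-- what changed: A's five ordered any(...) if-statements (early-return chain over phrase groups) are replaced by one unordered pass over a flat phrase-to-priority map collecting ALL matching priorities, after which min() over the collected priorities selects the outcome from a lookup table; equivalence rests on the minimum matched priority coinciding with A's first firing group.
import Mathlib
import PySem

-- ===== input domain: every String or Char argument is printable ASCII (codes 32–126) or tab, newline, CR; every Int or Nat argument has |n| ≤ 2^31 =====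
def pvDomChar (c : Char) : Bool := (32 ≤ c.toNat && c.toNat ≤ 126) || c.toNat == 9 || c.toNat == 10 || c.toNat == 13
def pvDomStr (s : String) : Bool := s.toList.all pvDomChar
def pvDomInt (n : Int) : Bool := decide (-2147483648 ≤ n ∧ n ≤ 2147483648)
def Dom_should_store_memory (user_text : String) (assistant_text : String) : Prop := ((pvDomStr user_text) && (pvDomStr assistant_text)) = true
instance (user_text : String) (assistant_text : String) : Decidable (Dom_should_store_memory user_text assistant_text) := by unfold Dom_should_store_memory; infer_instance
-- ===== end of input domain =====

-- B replaces A's five ordered any(...) if-statements by one unordered pass over a flat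
-- phrase→priority map collecting ALL matching priorities; min() over them selects the
-- outcome from a lookup table (objective: alternative decomposition; guards unchanged).

-- ===== PORT A =====
def should_store_memory (user_text : String) (assistant_text : String) : Bool × String :=
  let user_lower := PySem.Str.strip (PySem.Str.lower user_text)
  if PySem.Str.len user_lower == 0 then (false, "empty_input")
  else if PySem.Str.len user_lower ≤ 3 && !(PySem.Str.startswith user_lower "my name is") then
    (false, "too_short")
  else
    let common_transient := ["yes", "no", "ok", "okay", "thanks", "thank you", "um", "uh",
                             "got it", "good", "fine", "alright"]
    if common_transient.contains user_lower then (false, "acknowledgment")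
    else if PySem.Str.startswith user_lower "and " &&
            decide ((PySem.Str.split₀ user_lower).length < 4) then (false, "minor_continuation")
    else if ["my name is", "i am ", "call me "].any
              (fun p => PySem.Str.isIn p user_lower) then (true, "personal_info")
    else if ["i live in", "i work at", "i was born in"].any
              (fun p => PySem.Str.isIn p user_lower) then (true, "personal_info")
    else if ["i like", "i love", "i hate", "my favorite", "i prefer", "i dislike"].any
              (fun p => PySem.Str.isIn p user_lower) then (true, "preference")
    else if ["remember this", "don't forget", "important to know", "make a note"].any
              (fun p => PySem.Str.isIn p user_lower) then (true, "important")
    else if ["what do you remember", "what do you know about me", "tell me about yourself"].any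
              (fun p => PySem.Str.isIn p user_lower) then (false, "recall_request")
    else if decide ((PySem.Str.split₀ user_text).length > 7) then (true, "conversation_turn")
    else (false, "filtered_by_default")

-- ===== PORT B =====
-- the flat phrase → priority dict of Source B (literal items, insertion order)
def ssmPhrases : List (String × Int) :=
  [("my name is", 0), ("i am ", 0), ("call me ", 0),
   ("i live in", 1), ("i work at", 1), ("i was born in", 1),
   ("i like", 2), ("i love", 2), ("i hate", 2), ("my favorite", 2), ("i prefer", 2), ("i dislike", 2),
   ("remember this", 3), ("don't forget", 3), ("important to know", 3), ("make a note", 3),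
   ("what do you remember", 4), ("what do you know about me", 4), ("tell me about yourself", 4)]

-- the priority → outcome lookup table of Source B
def ssmOutcomes : List (Bool × String) :=
  [(true, "personal_info"), (true, "personal_info"), (true, "preference"),
   (true, "important"), (false, "recall_request")]

-- Source B's _hits: the comprehension collecting every matching priority
def ssmHits (u : String) : List Int :=
  (ssmPhrases.filter (fun pp => PySem.Str.isIn pp.1 u)).map (fun pp => pp.2)

def should_store_memory_alt (user_text : String) (assistant_text : String) : Bool × String :=
  let u := PySem.Str.strip (PySem.Str.lower user_text)
  if PySem.Str.len u == 0 then (false, "empty_input")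
  else if PySem.Str.len u ≤ 3 && !(PySem.Str.startswith u "my name is") then (false, "too_short")
  else if ["yes", "no", "ok", "okay", "thanks", "thank you", "um", "uh",
           "got it", "good", "fine", "alright"].contains u then (false, "acknowledgment")
  else if PySem.Str.startswith u "and " &&
          decide ((PySem.Str.split₀ u).length < 4) then (false, "minor_continuation")
  else
    match PySem.List.min? (ssmHits u) (fun x => x) with
    | some k => PySem.List.pyGetD ssmOutcomes k (false, "")  -- index 0 ≤ k < 5 provably in range
    | none =>
      if decide ((PySem.Str.split₀ user_text).length > 7) then (true, "conversation_turn")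
      else (false, "filtered_by_default")

-- ===== PRECONDITION & SPEC =====
def Spec_should_store_memory (user_text : String) (assistant_text : String) (out : Bool × String) : Prop := out = should_store_memory_alt user_text assistant_text
instance (user_text : String) (assistant_text : String) (out : Bool × String) : Decidable (Spec_should_store_memory user_text assistant_text out) := by unfold Spec_should_store_memory; infer_instance

-- ===== CLAIM (what is proved, stated in full; the proofs are below) =====
def Claim_equal_should_store_memory : Prop := ∀ (user_text : String) (assistant_text : String), Dom_should_store_memory user_text assistant_text → Spec_should_store_memory user_text assistant_text (should_store_memory user_text assistant_text)

-- ===== LEMMAS AND PROOFS =====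

-- min with identity key equals any lower bound that is a member of the list
theorem ssm_min?_id_eq {l : List Int} {k : Int} (hmem : k ∈ l) (hle : ∀ x ∈ l, k ≤ x) :
    PySem.List.min? l (fun x => x) = some k := by
  cases h : PySem.List.min? l (fun x => x) with
  | none =>
    rw [PySem.List.min?_eq_none_iff] at h
    subst h; cases hmem
  | some m =>
    have hm : m ∈ l := PySem.List.min?_mem h
    have h1 : m ≤ k := PySem.List.min?_isMin h k hmem
    have h2 : k ≤ m := hle m hm
    exact congrArg some (le_antisymm h2 h1).symm

theorem ssm_min0 (u : String)
    (h1 : ((["my name is", "i am ", "call me "].any (fun p => PySem.Str.isIn p u)) = true)) :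
    PySem.List.min? (ssmHits u) (fun x => x) = some 0 := by
  apply ssm_min?_id_eq
  · simp at h1
    simp only [ssmHits, ssmPhrases, List.mem_map, List.mem_filter]
    rcases h1 with h|h|h
    · exact ⟨("my name is", 0), ⟨by decide, by simpa using h⟩, rfl⟩
    · exact ⟨("i am ", 0), ⟨by decide, by simpa using h⟩, rfl⟩
    · exact ⟨("call me ", 0), ⟨by decide, by simpa using h⟩, rfl⟩
  · intro x hx
    simp only [ssmHits, List.mem_map, List.mem_filter] at hx
    obtain ⟨pp, ⟨hmem, hin⟩, rfl⟩ := hx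
    simp only [ssmPhrases, List.mem_cons, List.not_mem_nil, or_false] at hmem
    rcases hmem with rfl|rfl|rfl|rfl|rfl|rfl|rfl|rfl|rfl|rfl|rfl|rfl|rfl|rfl|rfl|rfl|rfl|rfl|rfl <;> norm_num

theorem ssm_min1 (u : String)
    (h1 : ¬ ((["my name is", "i am ", "call me "].any (fun p => PySem.Str.isIn p u)) = true))
    (h2 : ((["i live in", "i work at", "i was born in"].any (fun p => PySem.Str.isIn p u)) = true)) :
    PySem.List.min? (ssmHits u) (fun x => x) = some 1 := by
  apply ssm_min?_id_eq
  · simp at h2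
    simp only [ssmHits, ssmPhrases, List.mem_map, List.mem_filter]
    rcases h2 with h|h|h
    · exact ⟨("i live in", 1), ⟨by decide, by simpa using h⟩, rfl⟩
    · exact ⟨("i work at", 1), ⟨by decide, by simpa using h⟩, rfl⟩
    · exact ⟨("i was born in", 1), ⟨by decide, by simpa using h⟩, rfl⟩
  · intro x hx
    simp at h1
    simp only [ssmHits, List.mem_map, List.mem_filter] at hx
    obtain ⟨pp, ⟨hmem, hin⟩, rfl⟩ := hx
    simp only [ssmPhrases, List.mem_cons, List.not_mem_nil, or_false] at hmem
    rcases hmem with rfl|rfl|rfl|rfl|rfl|rfl|rfl|rfl|rfl|rfl|rfl|rfl|rfl|rfl|rfl|rfl|rfl|rfl|rfl <;> simp_all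

theorem ssm_min2 (u : String)
    (h1 : ¬ ((["my name is", "i am ", "call me "].any (fun p => PySem.Str.isIn p u)) = true))
    (h2 : ¬ ((["i live in", "i work at", "i was born in"].any (fun p => PySem.Str.isIn p u)) = true))
    (h3 : ((["i like", "i love", "i hate", "my favorite", "i prefer", "i dislike"].any (fun p => PySem.Str.isIn p u)) = true)) :
    PySem.List.min? (ssmHits u) (fun x => x) = some 2 := by
  apply ssm_min?_id_eq
  · simp at h3
    simp only [ssmHits, ssmPhrases, List.mem_map, List.mem_filter]
    rcases h3 with h|h|h|h|h|h
    · exact ⟨("i like", 2), ⟨by decide, by simpa using h⟩, rfl⟩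
    · exact ⟨("i love", 2), ⟨by decide, by simpa using h⟩, rfl⟩
    · exact ⟨("i hate", 2), ⟨by decide, by simpa using h⟩, rfl⟩
    · exact ⟨("my favorite", 2), ⟨by decide, by simpa using h⟩, rfl⟩
    · exact ⟨("i prefer", 2), ⟨by decide, by simpa using h⟩, rfl⟩
    · exact ⟨("i dislike", 2), ⟨by decide, by simpa using h⟩, rfl⟩
  · intro x hx
    simp at h1 h2
    simp only [ssmHits, List.mem_map, List.mem_filter] at hx
    obtain ⟨pp, ⟨hmem, hin⟩, rfl⟩ := hx
    simp only [ssmPhrases, List.mem_cons, List.not_mem_nil, or_false] at hmem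
    rcases hmem with rfl|rfl|rfl|rfl|rfl|rfl|rfl|rfl|rfl|rfl|rfl|rfl|rfl|rfl|rfl|rfl|rfl|rfl|rfl <;> simp_all

theorem ssm_min3 (u : String)
    (h1 : ¬ ((["my name is", "i am ", "call me "].any (fun p => PySem.Str.isIn p u)) = true))
    (h2 : ¬ ((["i live in", "i work at", "i was born in"].any (fun p => PySem.Str.isIn p u)) = true))
    (h3 : ¬ ((["i like", "i love", "i hate", "my favorite", "i prefer", "i dislike"].any (fun p => PySem.Str.isIn p u)) = true))
    (h4 : ((["remember this", "don't forget", "important to know", "make a note"].any (fun p => PySem.Str.isIn p u)) = true)) :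
    PySem.List.min? (ssmHits u) (fun x => x) = some 3 := by
  apply ssm_min?_id_eq
  · simp at h4
    simp only [ssmHits, ssmPhrases, List.mem_map, List.mem_filter]
    rcases h4 with h|h|h|h
    · exact ⟨("remember this", 3), ⟨by decide, by simpa using h⟩, rfl⟩
    · exact ⟨("don't forget", 3), ⟨by decide, by simpa using h⟩, rfl⟩
    · exact ⟨("important to know", 3), ⟨by decide, by simpa using h⟩, rfl⟩
    · exact ⟨("make a note", 3), ⟨by decide, by simpa using h⟩, rfl⟩
  · intro x hx
    simp at h1 h2 h3
    simp only [ssmHits, List.mem_map, List.mem_filter] at hx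
    obtain ⟨pp, ⟨hmem, hin⟩, rfl⟩ := hx
    simp only [ssmPhrases, List.mem_cons, List.not_mem_nil, or_false] at hmem
    rcases hmem with rfl|rfl|rfl|rfl|rfl|rfl|rfl|rfl|rfl|rfl|rfl|rfl|rfl|rfl|rfl|rfl|rfl|rfl|rfl <;> simp_all

theorem ssm_min4 (u : String)
    (h1 : ¬ ((["my name is", "i am ", "call me "].any (fun p => PySem.Str.isIn p u)) = true))
    (h2 : ¬ ((["i live in", "i work at", "i was born in"].any (fun p => PySem.Str.isIn p u)) = true))
    (h3 : ¬ ((["i like", "i love", "i hate", "my favorite", "i prefer", "i dislike"].any (fun p => PySem.Str.isIn p u)) = true))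
    (h4 : ¬ ((["remember this", "don't forget", "important to know", "make a note"].any (fun p => PySem.Str.isIn p u)) = true))
    (h5 : ((["what do you remember", "what do you know about me", "tell me about yourself"].any (fun p => PySem.Str.isIn p u)) = true)) :
    PySem.List.min? (ssmHits u) (fun x => x) = some 4 := by
  apply ssm_min?_id_eq
  · simp at h5
    simp only [ssmHits, ssmPhrases, List.mem_map, List.mem_filter]
    rcases h5 with h|h|h
    · exact ⟨("what do you remember", 4), ⟨by decide, by simpa using h⟩, rfl⟩
    · exact ⟨("what do you know about me", 4), ⟨by decide, by simpa using h⟩, rfl⟩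
    · exact ⟨("tell me about yourself", 4), ⟨by decide, by simpa using h⟩, rfl⟩
  · intro x hx
    simp at h1 h2 h3 h4
    simp only [ssmHits, List.mem_map, List.mem_filter] at hx
    obtain ⟨pp, ⟨hmem, hin⟩, rfl⟩ := hx
    simp only [ssmPhrases, List.mem_cons, List.not_mem_nil, or_false] at hmem
    rcases hmem with rfl|rfl|rfl|rfl|rfl|rfl|rfl|rfl|rfl|rfl|rfl|rfl|rfl|rfl|rfl|rfl|rfl|rfl|rfl <;> simp_all

theorem ssm_minNone (u : String)
    (h1 : ¬ ((["my name is", "i am ", "call me "].any (fun p => PySem.Str.isIn p u)) = true))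
    (h2 : ¬ ((["i live in", "i work at", "i was born in"].any (fun p => PySem.Str.isIn p u)) = true))
    (h3 : ¬ ((["i like", "i love", "i hate", "my favorite", "i prefer", "i dislike"].any (fun p => PySem.Str.isIn p u)) = true))
    (h4 : ¬ ((["remember this", "don't forget", "important to know", "make a note"].any (fun p => PySem.Str.isIn p u)) = true))
    (h5 : ¬ ((["what do you remember", "what do you know about me", "tell me about yourself"].any (fun p => PySem.Str.isIn p u)) = true)) :
    PySem.List.min? (ssmHits u) (fun x => x) = none := by
  rw [PySem.List.min?_eq_none_iff]
  simp at h1 h2 h3 h4 h5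
  simp_all [ssmHits, ssmPhrases]

-- the classification tail of A equals B's collect-then-min pipeline
theorem ssmTail_eq (u t : String) :
    (if ["my name is", "i am ", "call me "].any (fun p => PySem.Str.isIn p u) then ((true, "personal_info") : Bool × String)
     else if ["i live in", "i work at", "i was born in"].any (fun p => PySem.Str.isIn p u) then (true, "personal_info")
     else if ["i like", "i love", "i hate", "my favorite", "i prefer", "i dislike"].any (fun p => PySem.Str.isIn p u) then (true, "preference")
     else if ["remember this", "don't forget", "important to know", "make a note"].any (fun p => PySem.Str.isIn p u) then (true, "important")
     else if ["what do you remember", "what do you know about me", "tell me about yourself"].any (fun p => PySem.Str.isIn p u) then (false, "recall_request")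
     else if decide ((PySem.Str.split₀ t).length > 7) then (true, "conversation_turn")
     else (false, "filtered_by_default")) =
    (match PySem.List.min? (ssmHits u) (fun x => x) with
     | some k => PySem.List.pyGetD ssmOutcomes k (false, "")
     | none =>
       if decide ((PySem.Str.split₀ t).length > 7) then (true, "conversation_turn")
       else (false, "filtered_by_default")) := by
  by_cases h1 : (["my name is", "i am ", "call me "].any (fun p => PySem.Str.isIn p u)) = true
  · rw [if_pos h1, ssm_min0 u h1]; rfl
  · rw [if_neg h1]
    by_cases h2 : (["i live in", "i work at", "i was born in"].any (fun p => PySem.Str.isIn p u)) = true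
    · rw [if_pos h2, ssm_min1 u h1 h2]; rfl
    · rw [if_neg h2]
      by_cases h3 : (["i like", "i love", "i hate", "my favorite", "i prefer", "i dislike"].any (fun p => PySem.Str.isIn p u)) = true
      · rw [if_pos h3, ssm_min2 u h1 h2 h3]; rfl
      · rw [if_neg h3]
        by_cases h4 : (["remember this", "don't forget", "important to know", "make a note"].any (fun p => PySem.Str.isIn p u)) = true
        · rw [if_pos h4, ssm_min3 u h1 h2 h3 h4]; rfl
        · rw [if_neg h4]
          by_cases h5 : (["what do you remember", "what do you know about me", "tell me about yourself"].any (fun p => PySem.Str.isIn p u)) = true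
          · rw [if_pos h5, ssm_min4 u h1 h2 h3 h4 h5]; rfl
          · rw [if_neg h5, ssm_minNone u h1 h2 h3 h4 h5]

-- ===== VERDICT (by name: the statement is the Claim_ definition above) =====
theorem should_store_memory_spec : Claim_equal_should_store_memory := by
  intro user_text assistant_text _
  unfold Spec_should_store_memory should_store_memory should_store_memory_alt
  refine if_congr Iff.rfl rfl (if_congr Iff.rfl rfl (if_congr Iff.rfl rfl (if_congr Iff.rfl rfl ?_)))
  exact ssmTail_eq (PySem.Str.strip (PySem.Str.lower user_text)) user_text
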